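-- pv_equiv track=rewrite | github.com/manishdhakal2/ImgCaptionGenerator | src/eval.py | clean_reference
-- ===== SOURCE A (Python) =====
-- def clean_reference(caption_list):
--     references = []
--     for batch in caption_list:        # loop over batches
--         for caption in batch:         # loop over images in batch
--             clean = []
--             for token in caption:
--                 if token in ["<PAD>", "<START>"]:
--                     continue
--                 if token == "<END>":  # stop at first END, ignores duplicate
--                     break
--                 clean.append(token)
--             references.append(clean)
--     return references
-- ===== SOURCE B (Python) =====
-- def _clean_caption(caption):
--     end = caption.index("<END>") if "<END>" in caption else len(caption)
--     return [t for t in caption[:end] if t not in ("<PAD>", "<START>")]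
--
--
-- def clean_reference(caption_list):
--     return [_clean_caption(caption)
--             for batch in caption_list
--             for caption in batch]
-- ===== Notes on version B (the rewrite author's own statement) =====
-- stated objective: idiomatic
-- what changed: Replaces the single interleaved token loop (continue/break/append into an accumulator) by a two-stage decomposition: first cut the caption at the first '<END>' via index/slice, then filter out '<PAD>'/'<START>' with a comprehension, flattening the batch/image loops into one comprehension.
import Mathlib
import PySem

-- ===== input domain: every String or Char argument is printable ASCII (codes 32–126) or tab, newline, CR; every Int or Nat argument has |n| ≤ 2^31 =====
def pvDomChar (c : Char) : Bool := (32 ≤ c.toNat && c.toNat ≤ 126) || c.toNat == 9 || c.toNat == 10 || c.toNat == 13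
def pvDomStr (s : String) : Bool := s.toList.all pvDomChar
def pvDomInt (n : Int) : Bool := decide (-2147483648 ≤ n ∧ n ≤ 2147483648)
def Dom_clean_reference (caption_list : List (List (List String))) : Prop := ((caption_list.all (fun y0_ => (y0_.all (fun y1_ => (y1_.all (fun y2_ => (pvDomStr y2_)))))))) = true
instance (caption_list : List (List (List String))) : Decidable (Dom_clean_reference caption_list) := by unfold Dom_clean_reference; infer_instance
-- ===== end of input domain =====

-- B replaces A's interleaved continue/break/append loop by a cut-at-first-'<END>' (index + slice)
-- followed by a filter comprehension over flattened batch/image loops; same cost (objective: idiomatic).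

-- ===== PORT A =====
-- inner token loop of A: continue on PAD/START, break on END, else append to clean
def cleanLoopA : List String → List String → List String
  | [], clean => clean
  | t :: ts, clean =>
      if t = "<PAD>" ∨ t = "<START>" then cleanLoopA ts clean
      else if t = "<END>" then clean
      else cleanLoopA ts (clean ++ [t])

def clean_reference (caption_list : List (List (List String))) : List (List String) :=
  caption_list.foldl
    (fun references batch =>
      batch.foldl (fun references caption => references ++ [cleanLoopA caption []]) references)
    []

-- ===== PORT B =====
-- helper _clean_caption: end = caption.index("<END>") if present else len(caption); caption[:end]
-- (with end = index or len, both ≥ 0, the slice caption[:end] is List.take end) then filter.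
def cleanCapB (caption : List String) : List String :=
  let «end» : Nat :=
    if "<END>" ∈ caption then (PySem.List.index? caption "<END>").getD 0 else caption.length
  (caption.take «end»).filter (fun t => ¬ (t = "<PAD>" ∨ t = "<START>"))

def clean_reference_alt (caption_list : List (List (List String))) : List (List String) :=
  caption_list.flatMap (fun batch => batch.map (fun caption => cleanCapB caption))

-- ===== PRECONDITION & SPEC =====
def Spec_clean_reference (caption_list : List (List (List String))) (out : List (List String)) : Prop := out = clean_reference_alt caption_list
instance (caption_list : List (List (List String))) (out : List (List String)) : Decidable (Spec_clean_reference caption_list out) := by unfold Spec_clean_reference; infer_instance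

-- ===== CLAIM (what is proved, stated in full; the proofs are below) =====
def Claim_equal_clean_reference : Prop := ∀ (caption_list : List (List (List String))), Dom_clean_reference caption_list → Spec_clean_reference caption_list (clean_reference caption_list)

-- ===== LEMMAS AND PROOFS =====

theorem cleanCapB_nil : cleanCapB [] = [] := by decide

theorem cleanCapB_end (ts : List String) : cleanCapB ("<END>" :: ts) = [] := by
  simp only [cleanCapB]
  rw [PySem.List.index?_cons_self]
  simp

theorem cleanCapB_cons {t : String} (ht : t ≠ "<END>") (ts : List String) :
    cleanCapB (t :: ts) = (if t = "<PAD>" ∨ t = "<START>" then [] else [t]) ++ cleanCapB ts := by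
  simp only [cleanCapB]
  by_cases hm : "<END>" ∈ ts
  · have hmem : "<END>" ∈ t :: ts := List.mem_cons_of_mem _ hm
    obtain ⟨k, hk⟩ := Option.isSome_iff_exists.mp ((PySem.List.index?_isSome_iff ts "<END>").2 hm)
    rw [if_pos hmem, if_pos hm, PySem.List.index?_cons_of_ne ts ht, hk]
    simp only [Option.map_some, Option.getD_some, List.take_succ_cons, List.filter_cons]
    split_ifs <;> simp_all
  · have hmem : "<END>" ∉ t :: ts := by
      intro h
      rcases List.mem_cons.mp h with h | h
      · exact ht h.symm
      · exact hm h
    rw [if_neg hmem, if_neg hm]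
    simp only [List.take_length, List.filter_cons]
    split_ifs <;> simp_all

theorem cleanLoopA_eq (caption : List String) (acc : List String) :
    cleanLoopA caption acc = acc ++ cleanCapB caption := by
  induction caption generalizing acc with
  | nil => simp [cleanLoopA, cleanCapB_nil]
  | cons t ts ih =>
    by_cases hend : t = "<END>"
    · subst hend
      simp [cleanLoopA, cleanCapB_end]
    · rw [cleanCapB_cons hend]
      by_cases hps : t = "<PAD>" ∨ t = "<START>"
      · simp [cleanLoopA, hps, ih]
      · simp [cleanLoopA, hps, hend, ih]

theorem foldl_inner (batch : List (List String)) (acc : List (List String)) :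
    batch.foldl (fun references caption => references ++ [cleanLoopA caption []]) acc
      = acc ++ batch.map cleanCapB := by
  induction batch generalizing acc with
  | nil => simp
  | cons c cs ih =>
    rw [List.foldl_cons, ih]
    simp [cleanLoopA_eq]

theorem foldl_outer (caption_list : List (List (List String))) (acc : List (List String)) :
    caption_list.foldl
        (fun references batch =>
          batch.foldl (fun references caption => references ++ [cleanLoopA caption []]) references)
        acc
      = acc ++ caption_list.flatMap (fun batch => batch.map cleanCapB) := by
  induction caption_list generalizing acc with
  | nil => simp
  | cons b bs ih =>
    rw [List.foldl_cons, foldl_inner, ih]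
    simp

-- ===== VERDICT (by name: the statement is the Claim_ definition above) =====
theorem clean_reference_spec : Claim_equal_clean_reference := by
  intro caption_list _
  unfold Spec_clean_reference clean_reference clean_reference_alt
  rw [foldl_outer]
  simp
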